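-- pv_equiv track=rewrite | github.com/solracq/python-lab | CodingPractice/reviews/A_review.py | first_letter_twice
-- ===== SOURCE A (Python) =====
-- def first_letter_twice(s):
--     repeated = []
--     dictionary = {}
--     for i in range(len(s) - 1):
--         for j in range(i + 1, len(s)):
--             if s[i] == s[j] and s[j] not in repeated:
--                 repeated.append(s[i])
--                 dictionary[abs(i - j)] = s[j]
--
--     return dictionary[min(dictionary.keys())]
-- ===== SOURCE B (Python) =====
-- def first_letter_twice(s):
--     # One left-to-right pass: record each char's first index; at its second
--     # occurrence compute the gap and keep the best (gap <= best ties to the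
--     # later-finishing char, matching dict-overwrite-at-min semantics).
--     first = {}
--     best = None  # (gap, char)
--     for idx, ch in enumerate(s):
--         if ch not in first:
--             first[ch] = idx
--         else:
--             f = first[ch]
--             if f is not None:
--                 gap = idx - f
--                 if best is None or gap <= best[0]:
--                     best = (gap, ch)
--                 first[ch] = None
--     if best is None:
--         raise ValueError("no character occurs twice")
--     return best[1]
-- ===== Notes on version B (the rewrite author's own statement) =====
-- stated objective: faster
-- what changed: A's O(n^2) nested index loops plus a list-membership scan are replaced by one left-to-right pass that records each character's first index in a dict and, at its second occurrence, updates a running (gap, char) minimum with <= so ties keep the later pair.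
import Mathlib
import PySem

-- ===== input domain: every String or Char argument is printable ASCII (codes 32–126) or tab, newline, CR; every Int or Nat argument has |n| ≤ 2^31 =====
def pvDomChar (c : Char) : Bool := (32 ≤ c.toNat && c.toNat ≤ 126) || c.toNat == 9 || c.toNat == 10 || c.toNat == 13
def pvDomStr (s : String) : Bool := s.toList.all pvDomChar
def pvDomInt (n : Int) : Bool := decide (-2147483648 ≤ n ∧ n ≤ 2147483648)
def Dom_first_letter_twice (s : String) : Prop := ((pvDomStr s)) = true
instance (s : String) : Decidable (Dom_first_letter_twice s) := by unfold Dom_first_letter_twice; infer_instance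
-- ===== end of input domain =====

-- B replaces A's quadratic nested index loops by one linear pass with a first-index dict and a running (gap, char) minimum.

-- ===== PORT A =====
def pvAstep (cs : List Char) (i : Int) (st : List Char × PySem.Dict Int Char) (j : Int) :
    List Char × PySem.Dict Int Char :=
  if PySem.List.pyGetD cs i ' ' = PySem.List.pyGetD cs j ' ' ∧ PySem.List.pyGetD cs j ' ' ∉ st.1 then
    (st.1 ++ [PySem.List.pyGetD cs i ' '], st.2.insert |i - j| (PySem.List.pyGetD cs j ' '))
  else st

def pvAinner (cs : List Char) (st : List Char × PySem.Dict Int Char) (i : Int) :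
    List Char × PySem.Dict Int Char :=
  (PySem.List.pyRange (i + 1) (cs.length : Int) 1).foldl (pvAstep cs i) st

def pvAloop (cs : List Char) : List Char × PySem.Dict Int Char :=
  (PySem.List.pyRange 0 ((cs.length : Int) - 1) 1).foldl (pvAinner cs) ([], PySem.Dict.empty)

def first_letter_twice (s : String) : String :=
  match PySem.List.min? (pvAloop s.toList).2.keys (fun x => x) with
  | some m => String.ofList [(pvAloop s.toList).2.getD m ' ']
  | none => ""   -- Python: min() of an empty sequence raises ValueError; excluded by Pre_

-- ===== PORT B =====
def pvBstep (st : PySem.Dict Char (Option Int) × Option (Int × Char)) (p : Int × Char) :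
    PySem.Dict Char (Option Int) × Option (Int × Char) :=
  if ¬ st.1.contains p.2 then
    (st.1.insert p.2 (some p.1), st.2)
  else
    match st.1.getD p.2 none with
    | some f =>
        let gap := p.1 - f
        let best' := match st.2 with
          | none => some (gap, p.2)
          | some b => if gap ≤ b.1 then some (gap, p.2) else st.2
        (st.1.insert p.2 none, best')
    | none => st

def pvBfold (l : List Char) : PySem.Dict Char (Option Int) × Option (Int × Char) :=
  (PySem.List.enumerate l 0).foldl pvBstep (PySem.Dict.empty, none)

def first_letter_twice_alt (s : String) : String :=
  match (pvBfold s.toList).2 with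
  | some b => String.ofList [b.2]
  | none => ""   -- Python: raise ValueError; excluded by Pre_

-- ===== PRECONDITION & SPEC =====
-- Pre_: some character occurs twice; on a string with no repeated character BOTH Pythons raise ValueError.
def Pre_first_letter_twice (s : String) : Prop := ¬ s.toList.Nodup
instance (s : String) : Decidable (Pre_first_letter_twice s) := by unfold Pre_first_letter_twice; infer_instance
def pvWitness_first_letter_twice : String := "abcb"

def Spec_first_letter_twice (s : String) (out : String) : Prop := out = first_letter_twice_alt s
instance (s : String) (out : String) : Decidable (Spec_first_letter_twice s out) := by unfold Spec_first_letter_twice; infer_instance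

-- ===== CLAIM (what is proved, stated in full; the proofs are below) =====
def Claim_equal_first_letter_twice : Prop := ∀ (s : String), Dom_first_letter_twice s → Pre_first_letter_twice s → Spec_first_letter_twice s (first_letter_twice s)

-- ===== LEMMAS AND PROOFS =====

-- shared combinatorial vocabulary: pvQuals cs = first occurrences of repeating chars,
-- pvSecond/pvGap their second occurrence and the distance between them;
-- pvIsAns: the qualifying index of minimal gap, latest such index (= the answer's index)
def pvQual (cs : List Char) (k : Nat) : Bool :=
  !(cs.take k).contains (cs.getD k ' ') && (cs.drop (k + 1)).contains (cs.getD k ' ')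

def pvQuals (cs : List Char) : List Nat := (List.range cs.length).filter (pvQual cs)

def pvSecond (cs : List Char) (k : Nat) : Nat := k + 1 + (cs.drop (k + 1)).idxOf (cs.getD k ' ')

def pvGap (cs : List Char) (k : Nat) : Int := (pvSecond cs k : Int) - (k : Int)

def pvIsAns (cs : List Char) (q : Nat) : Prop :=
  q ∈ pvQuals cs ∧ (∀ q' ∈ pvQuals cs, pvGap cs q ≤ pvGap cs q') ∧
    (∀ q' ∈ pvQuals cs, pvGap cs q' = pvGap cs q → q' ≤ q)

lemma pvIsAns_unique (cs : List Char) (q q' : Nat) (h : pvIsAns cs q) (h' : pvIsAns cs q') : q = q' := by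
  obtain ⟨hm, hmin, hmax⟩ := h
  obtain ⟨hm', hmin', hmax'⟩ := h'
  have hg : pvGap cs q = pvGap cs q' := le_antisymm (hmin q' hm') (hmin' q hm)
  exact le_antisymm (hmax' q hm hg) (hmax q' hm' hg.symm)

lemma pv_getD_eq {cs : List Char} {k : Nat} (hk : k < cs.length) : cs.getD k ' ' = cs[k] := by
  rw [List.getD_eq_getElem?_getD, List.getElem?_eq_getElem hk]; rfl

lemma pv_not_mem_take_idxOf {cs : List Char} (c : Char) : c ∉ cs.take (cs.idxOf c) := by
  intro h
  have hpre : (cs.take (cs.idxOf c)) <+: cs := List.take_prefix _ _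
  have := hpre.idxOf_eq_of_mem h
  have hlt : (cs.take (cs.idxOf c)).idxOf c < (cs.take (cs.idxOf c)).length :=
    List.idxOf_lt_length_of_mem h
  simp [List.length_take] at hlt
  omega

lemma pv_idxOf_eq {cs : List Char} {c : Char} {k : Nat} (hk : k < cs.length)
    (h1 : c ∉ cs.take k) (h2 : cs[k] = c) : cs.idxOf c = k := by
  have hsplit : cs = cs.take k ++ cs.drop k := (List.take_append_drop k cs).symm
  have hdrop : cs.drop k = cs[k] :: cs.drop (k + 1) := List.drop_eq_getElem_cons hk
  conv_lhs => rw [hsplit]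
  rw [List.idxOf_append_of_notMem h1, hdrop, h2, List.idxOf_cons_self]
  simp [List.length_take]
  omega

-- ---- A-side: the nested loops build exactly the (gap ↦ char) dict over pvQuals ----

lemma step_fold_mem (cs : List Char) (i : Int) :
    ∀ (js : List Int) (st : List Char × PySem.Dict Int Char),
      PySem.List.pyGetD cs i ' ' ∈ st.1 → js.foldl (pvAstep cs i) st = st := by
  intro js
  induction js with
  | nil => intro st _; rfl
  | cons j t ih =>
    intro st hm
    have hstep : pvAstep cs i st j = st := by
      unfold pvAstep
      rw [if_neg]
      rintro ⟨heq, hnm⟩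
      exact hnm (heq ▸ hm)
    simp only [List.foldl_cons, hstep]
    exact ih st hm

lemma step_fold_nomem (cs : List Char) (i : Int) :
    ∀ (js : List Int) (st : List Char × PySem.Dict Int Char),
      PySem.List.pyGetD cs i ' ' ∉ st.1 →
      js.foldl (pvAstep cs i) st =
        match js.find? (fun j => PySem.List.pyGetD cs j ' ' == PySem.List.pyGetD cs i ' ') with
        | none => st
        | some j0 => (st.1 ++ [PySem.List.pyGetD cs i ' '],
                      st.2.insert |i - j0| (PySem.List.pyGetD cs i ' ')) := by
  intro js
  induction js with
  | nil => intro st _; rfl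
  | cons j t ih =>
    intro st hnm
    by_cases hj : PySem.List.pyGetD cs j ' ' = PySem.List.pyGetD cs i ' '
    · have hfind : (j :: t).find? (fun j => PySem.List.pyGetD cs j ' ' == PySem.List.pyGetD cs i ' ') = some j := by
        simp [hj]
      simp only [hfind]
      have hstep : pvAstep cs i st j =
          (st.1 ++ [PySem.List.pyGetD cs i ' '], st.2.insert |i - j| (PySem.List.pyGetD cs i ' ')) := by
        unfold pvAstep
        rw [if_pos ⟨hj.symm, by rw [hj]; exact hnm⟩, hj]
      simp only [List.foldl_cons, hstep]
      apply step_fold_mem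
      simp
    · have hfind : (j :: t).find? (fun j => PySem.List.pyGetD cs j ' ' == PySem.List.pyGetD cs i ' ') =
          t.find? (fun j => PySem.List.pyGetD cs j ' ' == PySem.List.pyGetD cs i ' ') := by
        simp [hj]
      have hstep : pvAstep cs i st j = st := by
        unfold pvAstep
        rw [if_neg]
        rintro ⟨heq, _⟩
        exact hj heq.symm
      simp only [List.foldl_cons, hstep, hfind]
      exact ih st hnm

lemma find_aux (cs : List Char) (c : Char) :
    ∀ (m a : Nat), a + m = cs.length →
      (PySem.List.pyRange (a : Int) (cs.length : Int) 1).find?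
          (fun j => PySem.List.pyGetD cs j ' ' == c) =
        if (cs.drop a).contains c then some ((a + (cs.drop a).idxOf c : Nat) : Int) else none := by
  intro m
  induction m with
  | zero =>
    intro a ha
    have : a = cs.length := by omega
    subst this
    rw [PySem.List.pyRange_one_eq_nil (by omega), List.drop_length]
    simp
  | succ m ih =>
    intro a ha
    have halt : a < cs.length := by omega
    rw [PySem.List.pyRange_one_cons (by exact_mod_cast halt)]
    rw [List.find?_cons]
    have hget : PySem.List.pyGetD cs (a : Int) ' ' = cs[a] := by
      rw [PySem.List.pyGetD_natCast, List.getD_eq_getElem?_getD, List.getElem?_eq_getElem halt]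
      rfl
    have hdrop : cs.drop a = cs[a] :: cs.drop (a + 1) := List.drop_eq_getElem_cons halt
    by_cases hc : cs[a] = c
    · simp [hget, hc, hdrop]
    · have h1 : (PySem.List.pyGetD cs (a : Int) ' ' == c) = false := by simp [hget, hc]
      rw [h1]
      have : ((a : Int) + 1) = ((a + 1 : Nat) : Int) := by push_cast; ring
      rw [this, ih (a + 1) (by omega)]
      rw [hdrop]
      simp only [List.contains_cons, List.idxOf_cons]
      have hbeq : (cs[a] == c) = false := by simp [hc]
      have hbeq2 : (c == cs[a]) = false := beq_eq_false_iff_ne.mpr (fun h => hc h.symm)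
      rw [hbeq2, hbeq]
      simp only [Bool.false_or]
      by_cases hmem : (cs.drop (a+1)).contains c
      · rw [if_pos hmem, if_pos hmem]
        congr 1
        simp only [Bool.cond_false]
        push_cast
        ring
      · rw [if_neg hmem, if_neg hmem]

lemma mem_repSpec (cs : List Char) (t : Nat) (ht : t ≤ cs.length) (c : Char) :
    (c ∈ ((List.range t).filter (pvQual cs)).map (fun q => cs.getD q ' ')) ↔
      (c ∈ cs.take t ∧ c ∈ cs.drop (cs.idxOf c + 1)) := by
  constructor
  · rintro hc
    rcases List.mem_map.1 hc with ⟨k, hk, rfl⟩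
    rcases List.mem_filter.1 hk with ⟨hkr, hq⟩
    have hkt : k < t := List.mem_range.1 hkr
    have hklen : k < cs.length := lt_of_lt_of_le hkt ht
    have hgetk : cs.getD k ' ' = cs[k] := pv_getD_eq hklen
    unfold pvQual at hq
    rw [Bool.and_eq_true] at hq
    obtain ⟨hq1, hq2⟩ := hq
    have hq1' : cs.getD k ' ' ∉ cs.take k := by
      simp only [Bool.not_eq_eq_eq_not, Bool.not_true, List.contains_eq_mem,
        decide_eq_false_iff_not] at hq1
      exact hq1
    have hidx : cs.idxOf (cs.getD k ' ') = k := by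
      rw [hgetk] at hq1' ⊢
      exact pv_idxOf_eq hklen hq1' rfl
    refine ⟨?_, ?_⟩
    · rw [hgetk]
      have h1 : (cs.take t)[k]'(by simp [List.length_take]; omega) = cs[k] := List.getElem_take
      rw [← h1]; exact List.getElem_mem _
    · rw [hidx]
      simpa using hq2
  · rintro ⟨h1, h2⟩
    set k := cs.idxOf c with hk
    have hct : c ∈ cs := List.mem_of_mem_take h1
    have hkt : k < t := by
      have := (List.take_prefix t cs).idxOf_eq_of_mem h1
      have h3 : (cs.take t).idxOf c < (cs.take t).length := List.idxOf_lt_length_of_mem h1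
      simp [List.length_take] at h3
      omega
    have hklen : k < cs.length := List.idxOf_lt_length_of_mem hct
    have hgetc : cs[k] = c := List.getElem_idxOf hklen
    refine List.mem_map.2 ⟨k, List.mem_filter.2 ⟨List.mem_range.2 hkt, ?_⟩, by rw [pv_getD_eq hklen, hgetc]⟩
    unfold pvQual
    rw [Bool.and_eq_true]
    constructor
    · simp only [pv_getD_eq hklen, hgetc, Bool.not_eq_eq_eq_not, Bool.not_true,
        List.contains_eq_mem, decide_eq_false_iff_not]
      exact fun hmem => pv_not_mem_take_idxOf c (by rwa [← hk])
    · simp only [pv_getD_eq hklen, hgetc, List.contains_eq_mem, decide_eq_true_eq]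
      exact h2

def pvDictSpec (cs : List Char) (l : List Nat) : PySem.Dict Int Char :=
  l.foldl (fun d q => d.insert (pvGap cs q) (cs.getD q ' ')) PySem.Dict.empty

lemma A_outer (cs : List Char) :
    ∀ (t : Nat), t ≤ cs.length →
      ((List.range t).map (Nat.cast : Nat → Int)).foldl (pvAinner cs) ([], PySem.Dict.empty) =
        (((List.range t).filter (pvQual cs)).map (fun q => cs.getD q ' '),
         pvDictSpec cs ((List.range t).filter (pvQual cs))) := by
  intro t
  induction t with
  | zero => intro _; rfl
  | succ t ih =>
    intro ht
    have htlen : t < cs.length := by omega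
    rw [List.range_succ, List.map_append, List.foldl_append, ih (by omega)]
    simp only [List.map_cons, List.map_nil, List.foldl_cons, List.foldl_nil]
    set rep := ((List.range t).filter (pvQual cs)).map (fun q => cs.getD q ' ') with hrep
    set c := cs.getD t ' ' with hc
    have hgett : PySem.List.pyGetD cs ((t : Nat) : Int) ' ' = c := by
      rw [PySem.List.pyGetD_natCast]
    have hrange : ((t : Int) + 1) = ((t + 1 : Nat) : Int) := by push_cast; ring
    -- the inner loop
    unfold pvAinner
    rw [List.filter_append]
    by_cases hqual : pvQual cs t
    · -- t qualifies: c unseen, c repeats later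
      unfold pvQual at hqual
      rw [Bool.and_eq_true] at hqual
      obtain ⟨hq1, hq2⟩ := hqual
      have hq1' : c ∉ cs.take t := by
        simp only [Bool.not_eq_eq_eq_not, Bool.not_true, List.contains_eq_mem,
          decide_eq_false_iff_not] at hq1
        exact hq1
      have hnotrep : c ∉ rep := by
        rw [hrep]
        intro hmem
        exact hq1' ((mem_repSpec cs t (by omega) c).1 hmem).1
      rw [step_fold_nomem cs (t : Int) _ _ (by rw [hgett]; exact hnotrep)]
      rw [hgett, hrange, find_aux cs c (cs.length - (t+1)) (t+1) (by omega)]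
      rw [if_pos hq2]
      have habs : |((t : Nat) : Int) - ((t + 1 + (cs.drop (t + 1)).idxOf c : Nat) : Int)| = pvGap cs t := by
        unfold pvGap pvSecond
        rw [← hc]
        rw [abs_sub_comm]
        rw [abs_of_nonneg (by push_cast; omega)]
      have hfilter : (List.filter (pvQual cs) [t]) = [t] := by
        simp only [List.filter_cons, List.filter_nil]
        rw [if_pos]
        unfold pvQual
        rw [Bool.and_eq_true]
        exact ⟨hq1, hq2⟩
      rw [hfilter]
      dsimp only
      rw [habs, List.map_append]
      unfold pvDictSpec
      rw [List.foldl_append]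
      simp only [List.map_cons, List.map_nil, List.foldl_cons, List.foldl_nil]
      rw [hrep, ← hc]
    · -- t does not qualify
      have hfilter : (List.filter (pvQual cs) [t]) = [] := by
        simp [hqual]
      rw [hfilter, List.append_nil]
      by_cases hmem : c ∈ cs.take t
      · -- c seen before: its first occurrence qualifies, so c ∈ rep; loop does nothing
        have hcrep : c ∈ rep := by
          rw [hrep]
          apply (mem_repSpec cs t (by omega) c).2
          refine ⟨hmem, ?_⟩
          -- c occurs at position t, and idxOf c < t
          have hct : c ∈ cs := List.mem_of_mem_take hmem
          have hidxlt : cs.idxOf c < t := by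
            have := (List.take_prefix t cs).idxOf_eq_of_mem hmem
            have h3 : (cs.take t).idxOf c < (cs.take t).length := List.idxOf_lt_length_of_mem hmem
            simp [List.length_take] at h3
            omega
          have : cs = cs.take (cs.idxOf c + 1) ++ cs.drop (cs.idxOf c + 1) :=
            (List.take_append_drop _ cs).symm
          have hgt : cs[t] = c := by rw [← pv_getD_eq htlen, ← hc]
          have : c ∈ cs.drop (cs.idxOf c + 1) := by
            have hlen2 : t - (cs.idxOf c + 1) < (cs.drop (cs.idxOf c + 1)).length := by
              simp [List.length_drop]; omega
            refine List.mem_iff_getElem.2 ⟨t - (cs.idxOf c + 1), hlen2, ?_⟩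
            rw [List.getElem_drop]
            conv_rhs => rw [← hgt]
            congr 1
            omega
          exact this
        rw [step_fold_mem cs (t : Int) _ _ (by rw [hgett]; exact hcrep)]
      · -- c unseen and (since ¬qual) not repeated later: find fails, loop does nothing
        have hnotrep : c ∉ rep := by
          rw [hrep]
          intro hm
          exact hmem ((mem_repSpec cs t (by omega) c).1 hm).1
        rw [step_fold_nomem cs (t : Int) _ _ (by rw [hgett]; exact hnotrep)]
        rw [hgett, hrange, find_aux cs c (cs.length - (t+1)) (t+1) (by omega)]
        have ha : (!(cs.take t).contains (cs.getD t ' ')) = true := by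
          rw [← hc]
          simp only [Bool.not_eq_eq_eq_not, Bool.not_true, List.contains_eq_mem,
            decide_eq_false_iff_not]
          exact hmem
        have hq2 : ((cs.drop (t + 1)).contains c) = false := by
          cases hcontains : (cs.drop (t + 1)).contains c
          · rfl
          · exfalso
            apply hqual
            unfold pvQual
            rw [Bool.and_eq_true]
            exact ⟨ha, by rw [← hc]; exact hcontains⟩
        rw [hq2]
        simp only [Bool.false_eq_true, if_false]
        rw [hrep]

lemma quals_trim (cs : List Char) :
    pvQuals cs = (List.range (cs.length - 1)).filter (pvQual cs) := by
  unfold pvQuals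
  cases hn : cs.length with
  | zero => simp
  | succ n =>
    rw [List.range_succ, List.filter_append]
    have : List.filter (pvQual cs) [n] = [] := by
      simp only [List.filter_cons, List.filter_nil]
      rw [if_neg]
      unfold pvQual
      have : cs.drop (n + 1) = [] := by
        apply List.drop_eq_nil_of_le
        omega
      simp [this]
    simp [this]

lemma A_state (cs : List Char) :
    pvAloop cs = ((pvQuals cs).map (fun q => cs.getD q ' '), pvDictSpec cs (pvQuals cs)) := by
  unfold pvAloop
  rw [quals_trim]
  cases hn : cs.length with
  | zero =>
    rw [PySem.List.pyRange_one_eq_nil (by norm_num)]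
    simp
    rfl
  | succ n =>
    rw [show (((n + 1 : Nat) : Int) - 1) = ((n : Nat) : Int) by push_cast; ring]
    rw [PySem.List.pyRange_zero_natCast]
    rw [A_outer cs n (by omega)]
    simp

lemma dict_getD_foldl_insert (key : Nat → Int) (val : Nat → Char) :
    ∀ (l : List Nat) (d : PySem.Dict Int Char) (k : Int) (dflt : Char),
      (l.foldl (fun d q => d.insert (key q) (val q)) d).getD k dflt =
        (l.filter (fun q => key q == k)).foldl (fun _ q => val q) (d.getD k dflt) := by
  intro l
  induction l with
  | nil => intro d k dflt; rfl
  | cons q t ih =>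
    intro d k dflt
    simp only [List.foldl_cons, List.filter_cons]
    by_cases hk : key q = k
    · simp only [hk, beq_self_eq_true, if_pos]
      rw [ih, PySem.Dict.getD_insert_self]
      simp
    · have : (key q == k) = false := by simp [hk]
      simp only [this, Bool.false_eq_true, ite_false]
      rw [ih, PySem.Dict.getD_insert_of_ne (hne := fun h => hk h.symm)]

lemma foldl_const_last {α β : Type} (f : α → β) :
    ∀ (l : List α) (init : β), l.foldl (fun _ x => f x) init = (l.getLast?).elim init f := by
  intro l
  induction l with
  | nil => intro init; simp
  | cons x t ih =>
    intro init
    cases t with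
    | nil => simp
    | cons y u =>
      simp only [List.foldl_cons, ih, List.getLast?_cons_cons]
      cases h : (y :: u).getLast? with
      | none => simp at h
      | some z => simp

lemma pairwise_lt_le_getLast {l : List Nat} (hp : l.Pairwise (· < ·)) {z : Nat}
    (hz : l.getLast? = some z) : ∀ x ∈ l, x ≤ z := by
  induction l with
  | nil => simp at hz
  | cons a t ih =>
    intro x hx
    cases t with
    | nil =>
      simp at hz hx; omega
    | cons b u =>
      rw [List.getLast?_cons_cons] at hz
      rcases List.mem_cons.1 hx with hx | hx
      · subst hx
        have hb : z ∈ b :: u := List.mem_of_getLast? hz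
        have := (List.pairwise_cons.1 hp).1 z hb
        omega
      · exact ih hp.of_cons hz x hx

lemma quals_nonempty_of_not_nodup (cs : List Char) (h : ¬ cs.Nodup) : pvQuals cs ≠ [] := by
  rcases List.exists_duplicate_iff_not_nodup.2 h with ⟨x, hdup⟩
  have hcnt : 2 ≤ cs.count x := List.duplicate_iff_two_le_count.mp hdup
  have hx : x ∈ cs := hdup.mem
  set k := cs.idxOf x with hk
  have hklen : k < cs.length := List.idxOf_lt_length_of_mem hx
  have hgetk : cs[k] = x := List.getElem_idxOf hklen
  have hsplit : cs = cs.take (k+1) ++ cs.drop (k+1) := (List.take_append_drop _ cs).symm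
  have htake1 : cs.count x = (cs.take (k+1)).count x + (cs.drop (k+1)).count x := by
    conv_lhs => rw [hsplit]
    rw [List.count_append]
  have htk : (cs.take (k+1)).count x = 1 := by
    have h1 : cs.take (k+1) = cs.take k ++ [x] := by
      rw [← hgetk]
      exact List.take_succ_eq_append_getElem hklen
    rw [h1, List.count_append]
    have : (cs.take k).count x = 0 := by
      rw [List.count_eq_zero]
      exact pv_not_mem_take_idxOf x
    simp [this]
  have hdropmem : x ∈ cs.drop (k+1) := by
    rw [← List.count_pos_iff]
    omega
  intro hnil
  have : k ∈ pvQuals cs := by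
    unfold pvQuals
    refine List.mem_filter.2 ⟨List.mem_range.2 hklen, ?_⟩
    unfold pvQual
    rw [Bool.and_eq_true]
    constructor
    · simp only [pv_getD_eq hklen, hgetk, Bool.not_eq_eq_eq_not, Bool.not_true,
        List.contains_eq_mem, decide_eq_false_iff_not]
      exact pv_not_mem_take_idxOf x
    · simp only [pv_getD_eq hklen, hgetk, List.contains_eq_mem, decide_eq_true_eq]
      exact hdropmem
  rw [hnil] at this
  exact List.not_mem_nil this

lemma A_char (cs : List Char) (h : ¬ cs.Nodup) :
    ∃ q, pvIsAns cs q ∧ first_letter_twice (String.ofList cs) = String.ofList [cs.getD q ' '] := by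
  have hquals : pvQuals cs ≠ [] := quals_nonempty_of_not_nodup cs h
  have htl : (String.ofList cs).toList = cs := by simp
  unfold first_letter_twice
  rw [htl, A_state]
  set gaps := (pvQuals cs).map (pvGap cs) with hgaps
  have hkeys : (pvDictSpec cs (pvQuals cs)).keys = PySem.Set.ofList gaps := by
    unfold pvDictSpec
    rw [PySem.Dict.keys_foldl_insert_key]
    rw [PySem.Dict.keys_empty]
    rw [PySem.Set.ofList_eq_foldl]
    rfl
  have hgapsne : gaps ≠ [] := by
    rw [hgaps]
    simp [hquals]
  have hkeysne : (pvDictSpec cs (pvQuals cs)).keys ≠ [] := by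
    rw [hkeys]
    intro hnil
    rcases List.exists_mem_of_ne_nil gaps hgapsne with ⟨g, hg⟩
    have := (PySem.Set.mem_ofList _ _).2 hg
    rw [hnil] at this
    exact List.not_mem_nil this
  obtain ⟨m, hm⟩ : ∃ m, PySem.List.min? (pvDictSpec cs (pvQuals cs)).keys (fun x => x) = some m := by
    cases hx : PySem.List.min? (pvDictSpec cs (pvQuals cs)).keys (fun x => x) with
    | none => exact absurd ((PySem.List.min?_eq_none_iff _ _).1 hx) hkeysne
    | some m => exact ⟨m, rfl⟩
  rw [hm]
  have hmmem : m ∈ gaps := by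
    have := PySem.List.min?_mem hm
    rw [hkeys] at this
    exact (PySem.Set.mem_ofList _ _).1 this
  have hmmin : ∀ g ∈ gaps, m ≤ g := by
    intro g hg
    have := PySem.List.min?_isMin hm g (by rw [hkeys]; exact (PySem.Set.mem_ofList _ _).2 hg)
    exact this
  -- the value at key m
  set flt := (pvQuals cs).filter (fun q => pvGap cs q == m) with hflt
  have hfltne : flt ≠ [] := by
    rcases List.mem_map.1 hmmem with ⟨q, hq, hgq⟩
    intro hnil
    have : q ∈ flt := List.mem_filter.2 ⟨hq, by simp [hgq]⟩
    rw [hnil] at this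
    exact List.not_mem_nil this
  obtain ⟨qstar, hqstar⟩ : ∃ z, flt.getLast? = some z := by
    cases hx : flt.getLast? with
    | none => exact absurd (List.getLast?_eq_none_iff.1 hx) hfltne
    | some z => exact ⟨z, rfl⟩
  have hval : (pvDictSpec cs (pvQuals cs)).getD m ' ' = cs.getD qstar ' ' := by
    unfold pvDictSpec
    rw [dict_getD_foldl_insert]
    rw [← hflt, foldl_const_last, hqstar]
    rfl
  refine ⟨qstar, ⟨?_, ?_, ?_⟩, by show String.ofList [(pvDictSpec cs (pvQuals cs)).getD m ' '] = _; rw [hval]⟩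
  · have : qstar ∈ flt := List.mem_of_getLast? hqstar
    exact (List.mem_filter.1 this).1
  · intro q' hq'
    have hgq : pvGap cs qstar = m := by
      have : qstar ∈ flt := List.mem_of_getLast? hqstar
      have := (List.mem_filter.1 this).2
      simpa using this
    rw [hgq]
    exact hmmin _ (List.mem_map.2 ⟨q', hq', rfl⟩)
  · intro q' hq' hgeq
    have hgq : pvGap cs qstar = m := by
      have : qstar ∈ flt := List.mem_of_getLast? hqstar
      simpa using (List.mem_filter.1 this).2
    have hq'flt : q' ∈ flt := List.mem_filter.2 ⟨hq', by simp [hgeq, hgq]⟩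
    have hpw : flt.Pairwise (· < ·) := by
      rw [hflt]
      apply List.Pairwise.filter
      unfold pvQuals
      apply List.Pairwise.filter
      exact List.pairwise_lt_range
    exact pairwise_lt_le_getLast hpw hqstar q' hq'flt

-- ---- B-side: the single pass maintains the running minimum over pvQuals ----

lemma quals_lt_length {l : List Char} {q : Nat} (h : q ∈ pvQuals l) : q < l.length :=
  List.mem_range.1 (List.mem_filter.1 h).1

lemma pv_second_lt {l : List Char} {q : Nat} (h : q ∈ pvQuals l) : pvSecond l q < l.length := by
  have hq := (List.mem_filter.1 h).2
  unfold pvQual at hq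
  rw [Bool.and_eq_true] at hq
  have hmem : l.getD q ' ' ∈ l.drop (q + 1) := by
    have := hq.2; simpa using this
  have hlt : (l.drop (q + 1)).idxOf (l.getD q ' ') < (l.drop (q + 1)).length :=
    List.idxOf_lt_length_of_mem hmem
  have hql : q < l.length := quals_lt_length h
  rw [List.length_drop] at hlt
  unfold pvSecond
  omega

lemma quals_append_of_mem {l : List Char} (x : Char) {q : Nat} (h : q ∈ pvQuals l) :
    q ∈ pvQuals (l ++ [x]) ∧ pvGap (l ++ [x]) q = pvGap l q ∧ (l ++ [x]).getD q ' ' = l.getD q ' ' := by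
  have hql : q < l.length := quals_lt_length h
  have hq := (List.mem_filter.1 h).2
  unfold pvQual at hq
  rw [Bool.and_eq_true] at hq
  have hget : (l ++ [x]).getD q ' ' = l.getD q ' ' := by
    rw [pv_getD_eq (by simp; omega), pv_getD_eq hql]
    exact List.getElem_append_left _
  have htake : (l ++ [x]).take q = l.take q := List.take_append_of_le_length (by omega)
  have hdrop : (l ++ [x]).drop (q + 1) = l.drop (q + 1) ++ [x] := List.drop_append_of_le_length (by omega)
  have hmem : l.getD q ' ' ∈ l.drop (q + 1) := by have := hq.2; simpa using this
  refine ⟨?_, ?_, hget⟩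
  · refine List.mem_filter.2 ⟨List.mem_range.2 (by simp; omega), ?_⟩
    unfold pvQual
    rw [Bool.and_eq_true, hget, htake, hdrop]
    refine ⟨hq.1, ?_⟩
    simp only [List.contains_eq_mem, decide_eq_true_eq, List.mem_append]
    exact Or.inl hmem
  · unfold pvGap pvSecond
    rw [hget, hdrop, List.idxOf_append_of_mem hmem]

lemma quals_append_cases {l : List Char} {x : Char} {q : Nat} (h : q ∈ pvQuals (l ++ [x])) :
    q ∈ pvQuals l ∨ (l.count x = 1 ∧ q = l.idxOf x) := by
  have hql : q < l.length + 1 := by have := quals_lt_length h; simpa using this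
  have hq := (List.mem_filter.1 h).2
  unfold pvQual at hq
  rw [Bool.and_eq_true] at hq
  by_cases hqlen : q = l.length
  · -- q is x's own position: drop (q+1) is empty, contradiction
    exfalso
    have : (l ++ [x]).drop (q + 1) = [] := by
      apply List.drop_eq_nil_of_le
      simp; omega
    rw [this] at hq
    simp at hq
  · have hql' : q < l.length := by omega
    have hget : (l ++ [x]).getD q ' ' = l.getD q ' ' := by
      rw [pv_getD_eq (by simp; omega), pv_getD_eq hql']
      exact List.getElem_append_left _
    have htake : (l ++ [x]).take q = l.take q := List.take_append_of_le_length (by omega)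
    have hdrop : (l ++ [x]).drop (q + 1) = l.drop (q + 1) ++ [x] := List.drop_append_of_le_length (by omega)
    rw [hget, htake, hdrop] at hq
    obtain ⟨h1, h2⟩ := hq
    have h1' : l.getD q ' ' ∉ l.take q := by
      simp only [Bool.not_eq_eq_eq_not, Bool.not_true, List.contains_eq_mem,
        decide_eq_false_iff_not] at h1
      exact h1
    by_cases hmem : l.getD q ' ' ∈ l.drop (q + 1)
    · left
      refine List.mem_filter.2 ⟨List.mem_range.2 hql', ?_⟩
      unfold pvQual
      rw [Bool.and_eq_true]
      refine ⟨by simpa using h1', by simpa using hmem⟩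
    · right
      -- the only new element is x itself, so getD q = x
      have hx : l.getD q ' ' = x := by
        simp only [List.contains_eq_mem, List.mem_append, decide_eq_true_eq] at h2
        rcases h2 with h2 | h2
        · exact absurd h2 hmem
        · simpa using h2
      have hgetq : l[q] = x := by rw [← pv_getD_eq hql', hx]
      have hidx : l.idxOf x = q := by
        have hnt : x ∉ l.take q := by rw [← hx]; exact h1'
        exact pv_idxOf_eq hql' hnt hgetq
      have hcnt : l.count x = 1 := by
        have hsplit : l = l.take (q+1) ++ l.drop (q+1) := (List.take_append_drop _ l).symm
        have htk : l.take (q + 1) = l.take q ++ [x] := by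
          rw [← hgetq]
          exact List.take_succ_eq_append_getElem hql'
        conv_lhs => rw [hsplit]
        rw [List.count_append, htk, List.count_append]
        have hz1 : (l.take q).count x = 0 := List.count_eq_zero.2 (by rw [← hx]; exact h1')
        have hz2 : (l.drop (q+1)).count x = 0 := List.count_eq_zero.2 (by rw [← hx]; exact hmem)
        simp [hz1, hz2]
      exact ⟨hcnt, hidx.symm⟩

lemma quals_append_new {l : List Char} {x : Char} (hcnt : l.count x = 1) :
    l.idxOf x ∈ pvQuals (l ++ [x]) ∧ pvGap (l ++ [x]) (l.idxOf x) = (l.length : Int) - (l.idxOf x : Int) ∧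
      (l ++ [x]).getD (l.idxOf x) ' ' = x := by
  have hxmem : x ∈ l := List.count_pos_iff.1 (by omega)
  set f := l.idxOf x with hf
  have hfl : f < l.length := List.idxOf_lt_length_of_mem hxmem
  have hgetf : l[f] = x := List.getElem_idxOf hfl
  have hget : (l ++ [x]).getD f ' ' = x := by
    rw [pv_getD_eq (by simp; omega)]
    rw [List.getElem_append_left _]
    exact hgetf
  have hnot2 : x ∉ l.drop (f + 1) := by
    intro hmem
    have hsplit : l = l.take (f+1) ++ l.drop (f+1) := (List.take_append_drop _ l).symm
    have htk : l.take (f + 1) = l.take f ++ [x] := by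
      rw [← hgetf]; exact List.take_succ_eq_append_getElem hfl
    have : l.count x = (l.take (f+1)).count x + (l.drop (f+1)).count x := by
      conv_lhs => rw [hsplit]; rw [List.count_append]
    rw [htk, List.count_append] at this
    have : 2 ≤ l.count x := by
      have hp : 0 < (l.drop (f+1)).count x := List.count_pos_iff.2 hmem
      simp at this
      omega
    omega
  have hdrop : (l ++ [x]).drop (f + 1) = l.drop (f + 1) ++ [x] := List.drop_append_of_le_length (by omega)
  have htake : (l ++ [x]).take f = l.take f := List.take_append_of_le_length (by omega)
  refine ⟨?_, ?_, hget⟩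
  · refine List.mem_filter.2 ⟨List.mem_range.2 (by simp; omega), ?_⟩
    unfold pvQual
    rw [Bool.and_eq_true, hget, htake, hdrop]
    constructor
    · simp only [Bool.not_eq_eq_eq_not, Bool.not_true, List.contains_eq_mem,
        decide_eq_false_iff_not]
      exact pv_not_mem_take_idxOf x
    · simp only [List.contains_eq_mem, decide_eq_true_eq, List.mem_append]
      right; simp
  · unfold pvGap pvSecond
    rw [hget, hdrop, List.idxOf_append_of_notMem hnot2]
    simp only [List.idxOf_cons_self, List.length_drop]
    push_cast
    omega

def pvBinv (l : List Char) : Prop :=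
  (∀ c : Char, (pvBfold l).1.get? c =
      if c ∈ l then some (if l.count c = 1 then some ((l.idxOf c : Nat) : Int) else none) else none) ∧
  ((pvBfold l).2 = none ↔ pvQuals l = []) ∧
  (∀ g c, (pvBfold l).2 = some (g, c) →
      ∃ q, pvIsAns l q ∧ pvGap l q = g ∧ l.getD q ' ' = c)

lemma B_step_shape (l : List Char) (x : Char) :
    pvBfold (l ++ [x]) = pvBstep (pvBfold l) (((l.length : Nat) : Int), x) := by
  unfold pvBfold
  rw [PySem.List.enumerate_append, List.foldl_append]
  simp [PySem.List.enumerate_cons, PySem.List.enumerate_nil]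

lemma isAns_transfer {l : List Char} {x : Char} {q : Nat}
    (hmemiff : ∀ q', q' ∈ pvQuals (l ++ [x]) ↔ q' ∈ pvQuals l)
    (h : pvIsAns l q) : pvIsAns (l ++ [x]) q := by
  obtain ⟨hmem, hmin, hmax⟩ := h
  refine ⟨(quals_append_of_mem x hmem).1, ?_, ?_⟩
  · intro q' hq'
    have hq'l := (hmemiff q').1 hq'
    rw [(quals_append_of_mem x hmem).2.1, (quals_append_of_mem x hq'l).2.1]
    exact hmin q' hq'l
  · intro q' hq' hgeq
    have hq'l := (hmemiff q').1 hq'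
    rw [(quals_append_of_mem x hmem).2.1, (quals_append_of_mem x hq'l).2.1] at hgeq
    exact hmax q' hq'l hgeq

lemma B_case_stable (l : List Char) (x : Char)
    (hmemiff : ∀ q', q' ∈ pvQuals (l ++ [x]) ↔ q' ∈ pvQuals l)
    (ih2 : (pvBfold l).2 = none ↔ pvQuals l = [])
    (ih3 : ∀ g c, (pvBfold l).2 = some (g, c) →
      ∃ q, pvIsAns l q ∧ pvGap l q = g ∧ l.getD q ' ' = c) :
    ((pvBfold l).2 = none ↔ pvQuals (l ++ [x]) = []) ∧
    (∀ g c, (pvBfold l).2 = some (g, c) →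
      ∃ q, pvIsAns (l ++ [x]) q ∧ pvGap (l ++ [x]) q = g ∧ (l ++ [x]).getD q ' ' = c) := by
  constructor
  · rw [ih2, List.eq_nil_iff_forall_not_mem, List.eq_nil_iff_forall_not_mem]
    constructor
    · intro h q hq
      exact h q ((hmemiff q).1 hq)
    · intro h q hq
      exact h q ((hmemiff q).2 hq)
  · intro g c hsome
    obtain ⟨q, hans, hgap, hchar⟩ := ih3 g c hsome
    refine ⟨q, isAns_transfer hmemiff hans, ?_, ?_⟩
    · rw [(quals_append_of_mem x hans.1).2.1]; exact hgap
    · rw [(quals_append_of_mem x hans.1).2.2]; exact hchar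

lemma B_case_notmem (l : List Char) (x : Char) (hxl : x ∉ l) (ih : pvBinv l) :
    pvBinv (l ++ [x]) := by
  obtain ⟨ih1, ih2, ih3⟩ := ih
  have hget : (pvBfold l).1.get? x = none := by rw [ih1]; simp [hxl]
  have hcont : (pvBfold l).1.contains x = false := by
    rw [PySem.Dict.contains_eq_isSome_get?, hget]; rfl
  have hstep : pvBfold (l ++ [x]) = ((pvBfold l).1.insert x (some ((l.length : Nat) : Int)), (pvBfold l).2) := by
    rw [B_step_shape]
    unfold pvBstep
    rw [if_pos (by rw [hcont]; simp)]
  have hmemiff : ∀ q', q' ∈ pvQuals (l ++ [x]) ↔ q' ∈ pvQuals l := by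
    intro q'
    constructor
    · intro h
      rcases quals_append_cases h with h | ⟨hc, _⟩
      · exact h
      · rw [List.count_eq_zero.2 hxl] at hc; omega
    · intro h
      exact (quals_append_of_mem x h).1
  obtain ⟨hc2, hc3⟩ := B_case_stable l x hmemiff ih2 ih3
  refine ⟨?_, ?_, ?_⟩
  · intro c
    rw [hstep]
    by_cases hcx : c = x
    · rw [hcx]
      rw [PySem.Dict.get?_insert_self]
      have hmem : x ∈ l ++ [x] := by simp
      have hcount : (l ++ [x]).count x = 1 := by
        rw [List.count_append, List.count_eq_zero.2 hxl]
        simp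
      have hidx : (l ++ [x]).idxOf x = l.length := by
        rw [List.idxOf_append_of_notMem hxl]
        simp
      rw [if_pos hmem, hcount, hidx]
      simp
    · rw [PySem.Dict.get?_insert_of_ne (hne := hcx), ih1]
      have hmemiff2 : (c ∈ l ++ [x]) ↔ c ∈ l := by
        simp [List.mem_append, hcx]
      have hcount : (l ++ [x]).count c = l.count c := by
        rw [List.count_append]
        have : List.count c [x] = 0 := by
          rw [List.count_eq_zero]; simp [hcx]
        omega
      by_cases hcl : c ∈ l
      · have hidx : (l ++ [x]).idxOf c = l.idxOf c := List.idxOf_append_of_mem hcl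
        rw [if_pos hcl, if_pos (hmemiff2.2 hcl), hcount, hidx]
      · rw [if_neg hcl, if_neg (fun h => hcl (hmemiff2.1 h))]
  · rw [hstep]; exact hc2
  · rw [hstep]; exact hc3

lemma B_case_two (l : List Char) (x : Char) (hxl : x ∈ l) (hcnt : l.count x ≠ 1) (ih : pvBinv l) :
    pvBinv (l ++ [x]) := by
  obtain ⟨ih1, ih2, ih3⟩ := ih
  have hcnt2 : 2 ≤ l.count x := by
    have : 0 < l.count x := List.count_pos_iff.2 hxl
    omega
  have hget : (pvBfold l).1.get? x = some none := by rw [ih1]; simp [hxl, hcnt]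
  have hcont : (pvBfold l).1.contains x = true := by
    rw [PySem.Dict.contains_eq_isSome_get?, hget]; rfl
  have hstep : pvBfold (l ++ [x]) = pvBfold l := by
    rw [B_step_shape]
    unfold pvBstep
    rw [if_neg (by rw [hcont]; simp)]
    have : (pvBfold l).1.getD x none = none := by
      rw [PySem.Dict.getD_eq_get?_getD, hget]; rfl
    rw [this]
  have hmemiff : ∀ q', q' ∈ pvQuals (l ++ [x]) ↔ q' ∈ pvQuals l := by
    intro q'
    constructor
    · intro h
      rcases quals_append_cases h with h | ⟨hc, _⟩
      · exact h
      · omega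
    · intro h
      exact (quals_append_of_mem x h).1
  obtain ⟨hc2, hc3⟩ := B_case_stable l x hmemiff ih2 ih3
  refine ⟨?_, ?_, ?_⟩
  · intro c
    rw [hstep, ih1]
    by_cases hcx : c = x
    · rw [hcx]
      have hcount : (l ++ [x]).count x = l.count x + 1 := by
        rw [List.count_append]; simp
      have h1 : (x ∈ l ++ [x]) := by simp
      rw [if_pos hxl, if_neg hcnt, if_pos h1, hcount, if_neg (by omega)]
    · have hmemiff2 : (c ∈ l ++ [x]) ↔ c ∈ l := by simp [List.mem_append, hcx]
      have hcount : (l ++ [x]).count c = l.count c := by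
        rw [List.count_append]
        have : List.count c [x] = 0 := by
          rw [List.count_eq_zero]; simp [hcx]
        omega
      by_cases hcl : c ∈ l
      · have hidx : (l ++ [x]).idxOf c = l.idxOf c := List.idxOf_append_of_mem hcl
        rw [if_pos hcl, if_pos (hmemiff2.2 hcl), hcount, hidx]
      · rw [if_neg hcl, if_neg (fun h => hcl (hmemiff2.1 h))]
  · rw [hstep]; exact hc2
  · rw [hstep]; exact hc3

lemma B_case_one (l : List Char) (x : Char) (hcnt : l.count x = 1) (ih : pvBinv l) :
    pvBinv (l ++ [x]) := by
  obtain ⟨ih1, ih2, ih3⟩ := ih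
  have hxl : x ∈ l := List.count_pos_iff.1 (by omega)
  have hget : (pvBfold l).1.get? x = some (some ((l.idxOf x : Nat) : Int)) := by
    rw [ih1]; simp [hxl, hcnt]
  have hcont : (pvBfold l).1.contains x = true := by
    rw [PySem.Dict.contains_eq_isSome_get?, hget]; rfl
  obtain ⟨hfq, hfgap, hfchar⟩ := quals_append_new hcnt
  have hstep : pvBfold (l ++ [x]) = ((pvBfold l).1.insert x none,
      match (pvBfold l).2 with
      | none => some (((l.length : Nat) : Int) - ((l.idxOf x : Nat) : Int), x)
      | some b => if ((l.length : Nat) : Int) - ((l.idxOf x : Nat) : Int) ≤ b.1 then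
          some (((l.length : Nat) : Int) - ((l.idxOf x : Nat) : Int), x) else (pvBfold l).2) := by
    rw [B_step_shape]
    unfold pvBstep
    rw [if_neg (by rw [hcont]; simp)]
    have hgd : (pvBfold l).1.getD x none = some ((l.idxOf x : Nat) : Int) := by
      rw [PySem.Dict.getD_eq_get?_getD, hget]; rfl
    rw [hgd]
  refine ⟨?_, ?_, ?_⟩
  · intro c
    rw [hstep]
    by_cases hcx : c = x
    · rw [hcx]
      rw [PySem.Dict.get?_insert_self]
      have hcount : (l ++ [x]).count x = l.count x + 1 := by
        rw [List.count_append]; simp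
      have h1 : (x ∈ l ++ [x]) := by simp
      rw [if_pos h1, hcount, if_neg (by omega)]
    · rw [PySem.Dict.get?_insert_of_ne (hne := hcx), ih1]
      have hmemiff2 : (c ∈ l ++ [x]) ↔ c ∈ l := by simp [List.mem_append, hcx]
      have hcount : (l ++ [x]).count c = l.count c := by
        rw [List.count_append]
        have : List.count c [x] = 0 := by
          rw [List.count_eq_zero]; simp [hcx]
        omega
      by_cases hcl : c ∈ l
      · have hidx : (l ++ [x]).idxOf c = l.idxOf c := List.idxOf_append_of_mem hcl
        rw [if_pos hcl, if_pos (hmemiff2.2 hcl), hcount, hidx]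
      · rw [if_neg hcl, if_neg (fun h => hcl (hmemiff2.1 h))]
  · -- second component is always `some …` here, and the new quals are nonempty
    rw [hstep]
    have hne : pvQuals (l ++ [x]) ≠ [] := List.ne_nil_of_mem hfq
    cases hb : (pvBfold l).2 with
    | none => simpa using hne
    | some b =>
      by_cases hle : ((l.length : Nat) : Int) - ((l.idxOf x : Nat) : Int) ≤ b.1
      · simpa [hle] using hne
      · simpa [hle] using hne
  · rw [hstep]
    intro g c hsome
    cases hb : (pvBfold l).2 with
    | none =>
      rw [hb] at hsome
      dsimp only at hsome
      have hpair : ((((l.length : Nat) : Int) - ((l.idxOf x : Nat) : Int) : Int), x) = (g, c) := by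
        injection hsome
      have hg : ((l.length : Nat) : Int) - ((l.idxOf x : Nat) : Int) = g := congrArg Prod.fst hpair
      have hc : x = c := congrArg Prod.snd hpair
      have hempty : pvQuals l = [] := ih2.1 hb
      refine ⟨l.idxOf x, ⟨hfq, ?_, ?_⟩, by rw [hfgap, hg], by rw [hfchar, hc]⟩
      · intro q' hq'
        rcases quals_append_cases hq' with h | ⟨_, rfl⟩
        · rw [hempty] at h; simp at h
        · exact le_refl _
      · intro q' hq' _
        rcases quals_append_cases hq' with h | ⟨_, rfl⟩
        · rw [hempty] at h; simp at h
        · exact le_refl _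
    | some b =>
      obtain ⟨q0, hq0ans, hq0gap, hq0char⟩ := ih3 b.1 b.2 (by rw [hb])
      rw [hb] at hsome
      dsimp only at hsome
      by_cases hle : ((l.length : Nat) : Int) - ((l.idxOf x : Nat) : Int) ≤ b.1
      · rw [if_pos hle] at hsome
        have hpair : ((((l.length : Nat) : Int) - ((l.idxOf x : Nat) : Int) : Int), x) = (g, c) := by
          injection hsome
        have hg : ((l.length : Nat) : Int) - ((l.idxOf x : Nat) : Int) = g := congrArg Prod.fst hpair
        have hc : x = c := congrArg Prod.snd hpair
        refine ⟨l.idxOf x, ⟨hfq, ?_, ?_⟩, by rw [hfgap, hg], by rw [hfchar, hc]⟩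
        · intro q' hq'
          rcases quals_append_cases hq' with h | ⟨_, rfl⟩
          · rw [hfgap, (quals_append_of_mem x h).2.1]
            calc ((l.length : Nat) : Int) - ((l.idxOf x : Nat) : Int) ≤ b.1 := hle
              _ ≤ pvGap l q' := hq0gap ▸ hq0ans.2.1 q' h
          · exact le_refl _
        · intro q' hq' hgeq
          rcases quals_append_cases hq' with h | ⟨_, rfl⟩
          · rw [hfgap, (quals_append_of_mem x h).2.1] at hgeq
            have hsec : pvSecond l q' < l.length := pv_second_lt h
            have hgapdef : pvGap l q' = (pvSecond l q' : Int) - (q' : Int) := rfl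
            have hfl : l.idxOf x < l.length := List.idxOf_lt_length_of_mem hxl
            rw [hgapdef] at hgeq
            omega
          · exact le_refl _
      · rw [if_neg hle] at hsome
        have hpair : b = (g, c) := by injection hsome
        have hg : b.1 = g := by rw [hpair]
        have hc : b.2 = c := by rw [hpair]
        refine ⟨q0, ⟨(quals_append_of_mem x hq0ans.1).1, ?_, ?_⟩, ?_, ?_⟩
        · intro q' hq'
          rw [(quals_append_of_mem x hq0ans.1).2.1]
          rcases quals_append_cases hq' with h | ⟨_, rfl⟩
          · rw [(quals_append_of_mem x h).2.1]
            exact hq0ans.2.1 q' h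
          · rw [hfgap, hq0gap]
            omega
        · intro q' hq' hgeq
          rw [(quals_append_of_mem x hq0ans.1).2.1] at hgeq
          rcases quals_append_cases hq' with h | ⟨_, rfl⟩
          · rw [(quals_append_of_mem x h).2.1] at hgeq
            exact hq0ans.2.2 q' h hgeq
          · rw [hfgap, hq0gap] at hgeq
            omega
        · rw [(quals_append_of_mem x hq0ans.1).2.1, hq0gap, hg]
        · rw [(quals_append_of_mem x hq0ans.1).2.2, hq0char, hc]

lemma B_inv : ∀ l : List Char, pvBinv l := by
  intro l
  induction l using List.reverseRecOn with
  | nil =>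
    refine ⟨fun c => rfl, ⟨fun _ => rfl, fun h => rfl⟩, fun g c h => by simp [pvBfold, PySem.List.enumerate_nil] at h⟩
  | append_singleton l x ih =>
    by_cases hxl : x ∈ l
    · by_cases hcnt : l.count x = 1
      · exact B_case_one l x hcnt ih
      · exact B_case_two l x hxl hcnt ih
    · exact B_case_notmem l x hxl ih

lemma B_char (cs : List Char) (h : ¬ cs.Nodup) :
    ∃ q, pvIsAns cs q ∧ first_letter_twice_alt (String.ofList cs) = String.ofList [cs.getD q ' '] := by
  obtain ⟨_, hinv2, hinv3⟩ := B_inv cs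
  have hquals := quals_nonempty_of_not_nodup cs h
  unfold first_letter_twice_alt
  have htl : (String.ofList cs).toList = cs := by simp
  rw [htl]
  cases hb : (pvBfold cs).2 with
  | none => exact absurd (hinv2.1 hb) hquals
  | some b =>
    obtain ⟨q, hans, hgap, hchar⟩ := hinv3 b.1 b.2 (by rw [hb])
    exact ⟨q, hans, by rw [hchar]⟩

-- ===== VERDICT (by name: the statement is the Claim_ definition above) =====
theorem first_letter_twice_spec : Claim_equal_first_letter_twice := by
  intro s _ hpre
  obtain ⟨q, hq, hAe⟩ := A_char s.toList hpre
  obtain ⟨q2, hq2, hBe⟩ := B_char s.toList hpre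
  unfold Spec_first_letter_twice
  have hqq : q = q2 := pvIsAns_unique _ _ _ hq hq2
  subst hqq
  rw [show String.ofList s.toList = s from String.ofList_toList] at hAe hBe
  rw [hAe, hBe]
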